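-- pv_equiv track=rewrite | github.com/AnasAlBahri/cuda-quantum | qasm3-cudaq-validation-bench/scripts/run_validation.py | _normalize_dut_counts_to_c0_first
-- ===== SOURCE A (Python) =====
-- from typing import Dict, Tuple, List
--
-- def _strip_key(k: str) -> str:
--     # Qiskit may include spaces between registers; remove them.
--     return str(k).replace(" ", "")
--
-- def _dut_qubitkey_to_c0_first_classicalkey(
--     qubit_key: str,
--     n_qubits: int,
--     n_clbits: int,
--     dut_order: str,
--     meas_q2c: List[int],
-- ) -> str:
--     """
--     Convert a DUT key (interpreted as *qubit bits*) into canonical classical key "c0..".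
--     - dut_order="cudaq": key is "q0 q1 ... q_{n-1}"
--     - dut_order="qiskit": key is "q_{n-1} ... q0" (rare, but support)
--     meas_q2c[q] = classical bit index that receives measure(q), or -1 if not measured.
--     """
--     kk = _strip_key(qubit_key)
--     if len(kk) != n_qubits:
--         # If CUDA-Q returns something unexpected, fall back without crashing.
--         # Pad/truncate to n_qubits (best-effort).
--         if len(kk) < n_qubits:
--             kk = kk.rjust(n_qubits, "0")
--         else:
--             kk = kk[-n_qubits:]
--
--     # Extract qubit bits as array qb[q] in {0,1}
--     qb = [0] * n_qubits
--     if dut_order == "cudaq":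
--         # kk[i] corresponds to q[i]
--         for i in range(n_qubits):
--             qb[i] = 1 if kk[i] == "1" else 0
--     elif dut_order == "qiskit":
--         # kk[0] corresponds to q[n-1]
--         for i in range(n_qubits):
--             qb[i] = 1 if kk[n_qubits - 1 - i] == "1" else 0
--     else:
--         raise ValueError(f"Unknown dut_order: {dut_order}")
--
--     # Build classical bits c[0..]
--     cb = [0] * n_clbits
--     for q in range(n_qubits):
--         c = meas_q2c[q] if q < len(meas_q2c) else -1
--         if c is None or c < 0 or c >= n_clbits:
--             continue
--         cb[c] = qb[q]
--
--     return "".join("1" if cb[i] else "0" for i in range(n_clbits))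
--
-- def _normalize_dut_counts_to_c0_first(
--     dut_counts: Dict[str, int],
--     n_qubits: int,
--     n_clbits: int,
--     meas_q2c: List[int],
--     dut_order: str,
-- ) -> Dict[str, int]:
--     out: Dict[str, int] = {}
--     for k, v in dut_counts.items():
--         canon = _dut_qubitkey_to_c0_first_classicalkey(k, n_qubits, n_clbits, dut_order, meas_q2c)
--         out[canon] = out.get(canon, 0) + int(v)
--     return out
-- ===== SOURCE B (Python) =====
-- def _pos_table(n_qubits, n_clbits, meas_q2c, src):
--     # pos[c] = index into the length-normalized key feeding classical bit c
--     # (last measured qubit wins), or -1 if c receives no measurement.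
--     pos = [-1] * max(n_clbits, 0)
--     for q in range(min(n_qubits, len(meas_q2c))):
--         c = meas_q2c[q]
--         if 0 <= c < n_clbits:
--             pos[c] = src(q)
--     return pos
--
-- def _normalize_dut_counts_to_c0_first(dut_counts, n_qubits, n_clbits, meas_q2c, dut_order):
--     if dut_order == "cudaq":
--         pos = _pos_table(n_qubits, n_clbits, meas_q2c, lambda q: q)
--     elif dut_order == "qiskit":
--         pos = _pos_table(n_qubits, n_clbits, meas_q2c, lambda q: n_qubits - 1 - q)
--     else:
--         raise ValueError(f"Unknown dut_order: {dut_order}")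
--     out = {}
--     for k, v in dut_counts.items():
--         kk = str(k).replace(" ", "")
--         if len(kk) < n_qubits:
--             kk = kk.rjust(n_qubits, "0")
--         elif len(kk) > n_qubits:
--             kk = kk[-n_qubits:]
--         canon = "".join("1" if p >= 0 and kk[p] == "1" else "0" for p in pos)
--         out[canon] = out.get(canon, 0) + int(v)
--     return out
-- ===== Notes on version B (the rewrite author's own statement) =====
-- stated objective: simpler
-- what changed: Instead of building per-key qubit-bit and classical-bit arrays with two index loops for every key, B computes one position table pos[c] -> source index up front and then just length-normalizes each key and gathers its canonical bits directly from that table.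
-- outside the precondition, e.g. on _normalize_dut_counts_to_c0_first({}, 1, 1, [0], 'weird'): A returns {}, B raises ValueError
import Mathlib
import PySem

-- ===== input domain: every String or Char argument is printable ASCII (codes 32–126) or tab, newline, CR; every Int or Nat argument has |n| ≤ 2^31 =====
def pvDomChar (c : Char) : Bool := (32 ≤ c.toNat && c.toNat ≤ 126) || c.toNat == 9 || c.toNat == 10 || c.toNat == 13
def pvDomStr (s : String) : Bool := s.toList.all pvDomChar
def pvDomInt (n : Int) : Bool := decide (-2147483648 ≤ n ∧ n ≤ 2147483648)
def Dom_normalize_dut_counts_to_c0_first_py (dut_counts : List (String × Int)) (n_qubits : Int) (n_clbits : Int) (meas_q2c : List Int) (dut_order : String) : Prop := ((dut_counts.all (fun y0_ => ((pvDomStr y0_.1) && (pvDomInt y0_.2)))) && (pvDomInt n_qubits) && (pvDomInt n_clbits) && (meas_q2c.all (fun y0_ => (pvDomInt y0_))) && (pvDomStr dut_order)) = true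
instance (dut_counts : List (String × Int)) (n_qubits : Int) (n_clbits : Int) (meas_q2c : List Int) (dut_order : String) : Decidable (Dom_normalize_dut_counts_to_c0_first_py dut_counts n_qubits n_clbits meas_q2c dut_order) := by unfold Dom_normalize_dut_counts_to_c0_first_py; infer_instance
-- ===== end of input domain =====

-- B replaces A's per-key qubit/classical bit arrays by a position table computed once,
-- so each key is normalized and gathered directly (objective: simpler; same asymptotic cost).
-- ===== PORT A =====

-- _strip_key
def pvStripKey (k : String) : List Char := PySem.Chars.replace k.toList [' '] []

-- the length normalization at the top of _dut_qubitkey_to_c0_first_classicalkey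
def pvNormLen (kk0 : List Char) (n_qubits : Int) : List Char :=
  if (kk0.length : Int) ≠ n_qubits then
    (if (kk0.length : Int) < n_qubits then
       List.replicate (n_qubits - (kk0.length : Int)).toNat '0' ++ kk0   -- kk.rjust(n_qubits, "0")
     else PySem.Chars.slice kk0 (some (-n_qubits)) none)                 -- kk[-n_qubits:]
  else kk0

-- the qb array; in the unknown-dut_order branch Python raises ValueError (outside
-- Pre_), here qb falls back to the all-zero list
def pvQB (kk : List Char) (n_qubits : Int) (dut_order : String) : List Int :=
  if dut_order == "cudaq" then
    (PySem.List.pyRange 0 n_qubits).foldl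
      (fun qb i => qb.set i.toNat (if (PySem.List.pyGet? kk i).getD '0' = '1' then 1 else 0))
      (List.replicate n_qubits.toNat 0)
  else if dut_order == "qiskit" then
    (PySem.List.pyRange 0 n_qubits).foldl
      (fun qb i => qb.set i.toNat (if (PySem.List.pyGet? kk (n_qubits - 1 - i)).getD '0' = '1' then 1 else 0))
      (List.replicate n_qubits.toNat 0)
  else List.replicate n_qubits.toNat 0

-- the cb array
def pvCB (qb : List Int) (n_qubits : Int) (n_clbits : Int) (meas_q2c : List Int) : List Int :=
  (PySem.List.pyRange 0 n_qubits).foldl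
    (fun cb q =>
      let c : Int := if q < (meas_q2c.length : Int)
                     then (PySem.List.pyGet? meas_q2c q).getD (-1) else -1
      if c < 0 ∨ n_clbits ≤ c then cb
      else cb.set c.toNat ((PySem.List.pyGet? qb q).getD 0))
    (List.replicate n_clbits.toNat 0)

-- _dut_qubitkey_to_c0_first_classicalkey
def pvCKey (qubit_key : String) (n_qubits : Int) (n_clbits : Int) (dut_order : String)
    (meas_q2c : List Int) : String :=
  let kk := pvNormLen (pvStripKey qubit_key) n_qubits
  let qb := pvQB kk n_qubits dut_order
  let cb := pvCB qb n_qubits n_clbits meas_q2c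
  String.ofList ((PySem.List.pyRange 0 n_clbits).map
    (fun i => if (PySem.List.pyGet? cb i).getD 0 ≠ 0 then '1' else '0'))

def normalize_dut_counts_to_c0_first_py (dut_counts : List (String × Int)) (n_qubits : Int) (n_clbits : Int) (meas_q2c : List Int) (dut_order : String) : List (String × Int) :=
  (dut_counts.foldl
    (fun (out : PySem.Dict String Int) kv =>
      let canon := pvCKey kv.1 n_qubits n_clbits dut_order meas_q2c
      out.insert canon (out.getD canon 0 + kv.2))
    PySem.Dict.empty).items

-- ===== PORT B =====

-- length-normalize a key (strip spaces, rjust-pad or tail-truncate to n_qubits)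
def pvAltNormKey (k : String) (n_qubits : Int) : List Char :=
  let kk := PySem.Chars.replace k.toList [' '] []
  if (kk.length : Int) < n_qubits then
    List.replicate (n_qubits - (kk.length : Int)).toNat '0' ++ kk
  else if n_qubits < (kk.length : Int) then
    PySem.Chars.slice kk (some (-n_qubits)) none
  else kk

-- _pos_table: pos[c] = source index in the normalized key feeding classical bit c, or -1
def pvAltTable (n_qubits : Int) (n_clbits : Int) (meas_q2c : List Int) (src : Int → Int) : List Int :=
  (PySem.List.pyRange 0 (min n_qubits (meas_q2c.length : Int))).foldl
    (fun pos q =>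
      let c := (PySem.List.pyGet? meas_q2c q).getD (-1)
      if 0 ≤ c ∧ c < n_clbits then pos.set c.toNat (src q) else pos)
    (List.replicate (max n_clbits 0).toNat (-1))

def pvAltAgg (dut_counts : List (String × Int)) (n_qubits : Int) (pos : List Int) : List (String × Int) :=
  (dut_counts.foldl
    (fun (out : PySem.Dict String Int) kv =>
      let kk := pvAltNormKey kv.1 n_qubits
      let canon := String.ofList (pos.map
        (fun p => if 0 ≤ p ∧ (PySem.List.pyGet? kk p).getD '0' = '1' then '1' else '0'))
      out.insert canon (out.getD canon 0 + kv.2))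
    PySem.Dict.empty).items

def normalize_dut_counts_to_c0_first_py_alt (dut_counts : List (String × Int)) (n_qubits : Int) (n_clbits : Int) (meas_q2c : List Int) (dut_order : String) : List (String × Int) :=
  if dut_order == "cudaq" then
    pvAltAgg dut_counts n_qubits (pvAltTable n_qubits n_clbits meas_q2c (fun q => q))
  else if dut_order == "qiskit" then
    pvAltAgg dut_counts n_qubits (pvAltTable n_qubits n_clbits meas_q2c (fun q => n_qubits - 1 - q))
  else []   -- Python B: raise ValueError (outside Pre_)

-- ===== PRECONDITION & SPEC =====
-- Pre_ excludes unknown dut_order values: there A raises ValueError on any nonempty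
-- dut_counts and returns {} only accidentally when dut_counts is empty (the order is
-- never inspected), while B validates dut_order up front and raises ValueError.
def Pre_normalize_dut_counts_to_c0_first_py (dut_counts : List (String × Int)) (n_qubits : Int) (n_clbits : Int) (meas_q2c : List Int) (dut_order : String) : Prop :=
  dut_order = "cudaq" ∨ dut_order = "qiskit"
instance (dut_counts : List (String × Int)) (n_qubits : Int) (n_clbits : Int) (meas_q2c : List Int) (dut_order : String) : Decidable (Pre_normalize_dut_counts_to_c0_first_py dut_counts n_qubits n_clbits meas_q2c dut_order) := by unfold Pre_normalize_dut_counts_to_c0_first_py; infer_instance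

def pvWitness_normalize_dut_counts_to_c0_first_py : (List (String × Int)) × Int × Int × List Int × String :=
  ([("01", 3), ("10", 5)], 2, 2, [0, 1], "cudaq")

def Spec_normalize_dut_counts_to_c0_first_py (dut_counts : List (String × Int)) (n_qubits : Int) (n_clbits : Int) (meas_q2c : List Int) (dut_order : String) (out : List (String × Int)) : Prop := out = normalize_dut_counts_to_c0_first_py_alt dut_counts n_qubits n_clbits meas_q2c dut_order
instance (dut_counts : List (String × Int)) (n_qubits : Int) (n_clbits : Int) (meas_q2c : List Int) (dut_order : String) (out : List (String × Int)) : Decidable (Spec_normalize_dut_counts_to_c0_first_py dut_counts n_qubits n_clbits meas_q2c dut_order out) := by unfold Spec_normalize_dut_counts_to_c0_first_py; infer_instance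

-- ===== CLAIM (what is proved, stated in full; the proofs are below) =====
def Claim_equal_normalize_dut_counts_to_c0_first_py : Prop := ∀ (dut_counts : List (String × Int)) (n_qubits : Int) (n_clbits : Int) (meas_q2c : List Int) (dut_order : String), Dom_normalize_dut_counts_to_c0_first_py dut_counts n_qubits n_clbits meas_q2c dut_order → Pre_normalize_dut_counts_to_c0_first_py dut_counts n_qubits n_clbits meas_q2c dut_order → Spec_normalize_dut_counts_to_c0_first_py dut_counts n_qubits n_clbits meas_q2c dut_order (normalize_dut_counts_to_c0_first_py dut_counts n_qubits n_clbits meas_q2c dut_order)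

-- ===== LEMMAS AND PROOFS =====

-- the 0/1 value classical bit c receives when its table entry is p
def pvGI (kk : List Char) (p : Int) : Int :=
  if 0 ≤ p ∧ (PySem.List.pyGet? kk p).getD '0' = '1' then 1 else 0

-- A's length normalization equals B's (same three cases, tested in a different order)
theorem pv_normKey_eq (kk0 : List Char) (n : Int) :
    (if (kk0.length : Int) ≠ n then
       (if (kk0.length : Int) < n then
          List.replicate (n - (kk0.length : Int)).toNat '0' ++ kk0
        else PySem.Chars.slice kk0 (some (-n)) none)
     else kk0)
    = (if (kk0.length : Int) < n then
         List.replicate (n - (kk0.length : Int)).toNat '0' ++ kk0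
       else if n < (kk0.length : Int) then PySem.Chars.slice kk0 (some (-n)) none
       else kk0) := by
  split_ifs <;> first | rfl | omega

-- in-order index fill of a list: foldl over range m of set i (f i)
theorem pv_fill_foldl {α : Type} (f : Nat → α) :
    ∀ (m : Nat) (init : List α), m ≤ init.length →
    (List.range m).foldl (fun l i => l.set i (f i)) init
      = (List.range m).map f ++ init.drop m := by
  intro m
  induction m with
  | zero => simp
  | succ m ih =>
    intro init h
    rw [List.range_succ, List.foldl_append, ih init (by omega)]
    have hd : init.drop m = init[m] :: init.drop (m + 1) := List.drop_eq_getElem_cons (by omega)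
    rw [List.foldl_cons, List.foldl_nil, List.set_append]
    simp only [List.length_map, List.length_range, lt_self_iff_false, if_false, Nat.sub_self]
    rw [hd, List.set_cons_zero, List.map_append]
    simp
theorem pv_foldl_id {α β : Type} (l : List α) (f : β → α → β)
    (h : ∀ x, ∀ a ∈ l, f x a = x) : ∀ x, l.foldl f x = x := by
  induction l with
  | nil => simp
  | cons a l ih =>
    intro x
    rw [List.foldl_cons, h x a (by simp)]
    exact ih (fun x b hb => h x b (by simp [hb])) x

-- the set-fold of A's cb loop tracks the set-fold of B's pos table through pvGI
theorem pv_fold_map_inv (ncl : Int) (cA cB vA src : Int → Int) (g : Int → Int)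
    (qs : List Int) (hq : ∀ q ∈ qs, cA q = cB q ∧ vA q = g (src q)) :
    ∀ pos : List Int,
    qs.foldl (fun cb q =>
        if cA q < 0 ∨ ncl ≤ cA q then cb else cb.set (cA q).toNat (vA q)) (pos.map g)
    = (qs.foldl (fun pos q =>
        if 0 ≤ cB q ∧ cB q < ncl then pos.set (cB q).toNat (src q) else pos) pos).map g := by
  induction qs with
  | nil => simp
  | cons q qs ih =>
    intro pos
    obtain ⟨hc, hv⟩ := hq q (by simp)
    simp only [List.foldl_cons]
    by_cases hg : 0 ≤ cB q ∧ cB q < ncl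
    · rw [if_pos hg, if_neg (by omega), hc, hv, ← List.map_set]
      exact ih (fun a ha => hq a (by simp [ha])) _
    · rw [if_neg hg, if_pos (by omega)]
      exact ih (fun a ha => hq a (by simp [ha])) _

-- the pos-table fold never changes the length
theorem pv_table_length (ncl : Int) (cB src : Int → Int) (qs : List Int) :
    ∀ pos : List Int,
    (qs.foldl (fun pos q =>
      if 0 ≤ cB q ∧ cB q < ncl then pos.set (cB q).toNat (src q) else pos) pos).length
    = pos.length := by
  induction qs with
  | nil => simp
  | cons q qs ih => intro pos; rw [List.foldl_cons]; split_ifs <;> simp [ih]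

theorem pv_pyRange_nil (b : Int) (h : b ≤ 0) : PySem.List.pyRange 0 b = [] := by
  simp [PySem.List.pyRange, h]

-- A's qb array, characterized as a map over the source positions
theorem pv_qb_eq (kk : List Char) (nq : Int) (ord : String) (src : Int → Int)
    (hord : (ord = "cudaq" ∧ src = fun q => q) ∨ (ord = "qiskit" ∧ src = fun q => nq - 1 - q)) :
    pvQB kk nq ord = (List.range nq.toNat).map (fun (i : Nat) => pvGI kk (src (i : Int))) := by
  by_cases h : 0 ≤ nq
  · obtain ⟨N, rfl⟩ : ∃ N : Nat, nq = (N : Int) := ⟨nq.toNat, (Int.toNat_of_nonneg h).symm⟩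
    rcases hord with ⟨h1, h2⟩ | ⟨h1, h2⟩ <;> subst h1 <;> subst h2 <;> unfold pvQB
    · rw [if_pos (by decide), PySem.List.pyRange_zero_natCast, List.foldl_map]
      simp only [Int.toNat_natCast]
      rw [pv_fill_foldl _ N (List.replicate N 0) (by simp)]
      simp only [List.drop_replicate, Nat.sub_self, List.replicate_zero, List.append_nil]
      apply List.map_congr_left
      intro i hi
      simp only [pvGI, Int.natCast_nonneg, true_and]
    · rw [if_neg (by decide), if_pos (by decide), PySem.List.pyRange_zero_natCast, List.foldl_map]
      simp only [Int.toNat_natCast]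
      rw [pv_fill_foldl _ N (List.replicate N 0) (by simp)]
      simp only [List.drop_replicate, Nat.sub_self, List.replicate_zero, List.append_nil]
      apply List.map_congr_left
      intro i hi
      simp only [List.mem_range] at hi
      have h0 : (0 : Int) ≤ (N : Int) - 1 - (i : Int) := by omega
      simp only [pvGI, h0, true_and]
  · have h0 : nq.toNat = 0 := by omega
    rcases hord with ⟨h1, _⟩ | ⟨h1, _⟩ <;> subst h1 <;>
      simp [pvQB, pv_pyRange_nil nq (by omega), h0]

-- A's cb array is B's position table read through pvGI
theorem pv_cb_eq (kk : List Char) (nq ncl : Int) (meas : List Int) (ord : String)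
    (src : Int → Int)
    (hord : (ord = "cudaq" ∧ src = fun q => q) ∨ (ord = "qiskit" ∧ src = fun q => nq - 1 - q)) :
    pvCB (pvQB kk nq ord) nq ncl meas = (pvAltTable nq ncl meas src).map (pvGI kk) := by
  have hinit : (List.replicate ncl.toNat (0 : Int))
      = (List.replicate (max ncl 0).toNat (-1 : Int)).map (pvGI kk) := by
    have hlen : (max ncl 0).toNat = ncl.toNat := by omega
    rw [List.map_replicate, hlen]
    congr 1
  have hvA : ∀ q : Int, 0 ≤ q → q < min nq (meas.length : Int) →
      (PySem.List.pyGet? (pvQB kk nq ord) q).getD 0 = pvGI kk (src q) := by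
    intro q hq0 hq1
    rw [pv_qb_eq kk nq ord src hord, PySem.List.pyGet?_of_nonneg _ hq0,
        ← List.getD_eq_getElem?_getD, PySem.List.getD_map_range _ _ _ _ (by omega),
        Int.toNat_of_nonneg hq0]
  unfold pvCB pvAltTable
  by_cases h : 0 ≤ nq
  · rw [PySem.List.pyRange_one_append 0 (min nq (meas.length : Int)) nq
      (by positivity) (min_le_left _ _), List.foldl_append]
    rw [hinit, pv_fold_map_inv ncl
      (fun q => if q < (meas.length : Int) then (PySem.List.pyGet? meas q).getD (-1) else -1)
      (fun q => (PySem.List.pyGet? meas q).getD (-1))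
      (fun q => (PySem.List.pyGet? (pvQB kk nq ord) q).getD 0) src (pvGI kk) _ ?_ _]
    · apply pv_foldl_id
      intro x q hq
      rw [PySem.List.mem_pyRange_one] at hq
      show (if (if q < (meas.length : Int) then (PySem.List.pyGet? meas q).getD (-1) else -1) < 0
              ∨ ncl ≤ (if q < (meas.length : Int) then (PySem.List.pyGet? meas q).getD (-1) else -1)
            then x else _) = x
      rw [if_neg (show ¬ q < (meas.length : Int) by omega), if_pos (by omega)]
    · intro q hq
      rw [PySem.List.mem_pyRange_one] at hq
      refine ⟨?_, hvA q (by omega) (by omega)⟩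
      show (if q < (meas.length : Int) then (PySem.List.pyGet? meas q).getD (-1) else -1)
            = (PySem.List.pyGet? meas q).getD (-1)
      rw [if_pos (by omega)]
  · rw [pv_pyRange_nil nq (by omega), pv_pyRange_nil _ (by omega)]
    simpa using hinit

-- reading every position of xs in order is xs itself
theorem pv_map_lookup {α β : Type} (xs : List α) (d : α) (F : α → β) (M : Nat)
    (hM : xs.length = M) :
    (PySem.List.pyRange 0 (M : Int)).map (fun i => F ((PySem.List.pyGet? xs i).getD d))
      = xs.map F := by
  subst hM
  conv_rhs => rw [← PySem.List.map_pyGetD_pyRange_zero xs d]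
  rw [List.map_map]
  rfl

-- core: A's per-key classical key equals B's gather over the position table
theorem pv_ckey_eq (k : String) (nq ncl : Int) (meas : List Int) (ord : String)
    (src : Int → Int)
    (hord : (ord = "cudaq" ∧ src = fun q => q) ∨ (ord = "qiskit" ∧ src = fun q => nq - 1 - q)) :
    pvCKey k nq ncl ord meas
      = String.ofList ((pvAltTable nq ncl meas src).map
          (fun p => if 0 ≤ p ∧ (PySem.List.pyGet? (pvAltNormKey k nq) p).getD '0' = '1'
                    then '1' else '0')) := by
  have hkk : pvNormLen (pvStripKey k) nq = pvAltNormKey k nq := by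
    simp only [pvNormLen, pvAltNormKey, pvStripKey]
    exact pv_normKey_eq _ _
  have hTlen : (pvAltTable nq ncl meas src).length = (max ncl 0).toNat := by
    unfold pvAltTable
    exact (pv_table_length ncl (fun q => (PySem.List.pyGet? meas q).getD (-1)) src _ _).trans
      (List.length_replicate)
  simp only [pvCKey, hkk, pv_cb_eq (pvAltNormKey k nq) nq ncl meas ord src hord]
  congr 1
  by_cases hncl : ncl ≤ 0
  · rw [pv_pyRange_nil ncl hncl,
      List.eq_nil_of_length_eq_zero (hTlen.trans (by omega))]
    simp
  · obtain ⟨M, rfl⟩ : ∃ M : Nat, ncl = (M : Int) :=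
      ⟨ncl.toNat, (Int.toNat_of_nonneg (by omega)).symm⟩
    refine Eq.trans (pv_map_lookup
      (List.map (pvGI (pvAltNormKey k nq)) (pvAltTable nq (M : Int) meas src)) 0
      (fun v => if v ≠ 0 then '1' else '0') M (by rw [List.length_map, hTlen]; omega)) ?_
    rw [List.map_map]
    apply List.map_congr_left
    intro p _
    by_cases hp : 0 ≤ p ∧ (PySem.List.pyGet? (pvAltNormKey k nq) p).getD '0' = '1'
    · simp [pvGI, hp]
    · simp [pvGI, hp]

-- fold the per-key equality through the aggregation loop
theorem pv_agg_eq (dc : List (String × Int)) (nq ncl : Int) (meas : List Int) (ord : String)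
    (src : Int → Int)
    (hord : (ord = "cudaq" ∧ src = fun q => q) ∨ (ord = "qiskit" ∧ src = fun q => nq - 1 - q)) :
    normalize_dut_counts_to_c0_first_py dc nq ncl meas ord
      = pvAltAgg dc nq (pvAltTable nq ncl meas src) := by
  unfold normalize_dut_counts_to_c0_first_py pvAltAgg
  congr 1
  apply PySem.List.foldl_congr_mem
  intro acc kv _
  rw [pv_ckey_eq kv.1 nq ncl meas ord src hord]

-- ===== VERDICT (by name: the statement is the Claim_ definition above) =====
theorem normalize_dut_counts_to_c0_first_py_spec : Claim_equal_normalize_dut_counts_to_c0_first_py := by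
  intro dc nq ncl meas ord _ hpre
  unfold Spec_normalize_dut_counts_to_c0_first_py normalize_dut_counts_to_c0_first_py_alt
  rcases hpre with h | h <;> subst h
  · rw [if_pos (by decide)]
    exact pv_agg_eq dc nq ncl meas "cudaq" _ (Or.inl ⟨rfl, rfl⟩)
  · rw [if_neg (by decide), if_pos (by decide)]
    exact pv_agg_eq dc nq ncl meas "qiskit" _ (Or.inr ⟨rfl, rfl⟩)
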